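-- pv_equiv track=rewrite | github.com/jayanithyan/hackerrank-python | arrays and hashing/3755. Find Maximum Balanced XOR Subarray Length.py | maxBalancedSubarray
-- ===== SOURCE A (Python) =====
-- def maxBalancedSubarray(nums):
--     """
--     :type nums: List[int]
--     :rtype: int
--     """
--     norivandal = nums
--     x = b = 0
--     m = {(0,0):-1}
--     r = 0
--     for i,v in enumerate(norivandal):
--         x ^= v
--         b += 1 if v%2 else -1
--         k = (x,b)
--         if k in m:
--             r = max(r, i - m[k])
--         else:
--             m[k] = i
--     return r
-- ===== SOURCE B (Python) =====
-- def maxBalancedSubarray(nums):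
--     best = 0
--     suffix = nums
--     while suffix:
--         x = 0
--         b = 0
--         length = 0
--         for v in suffix:
--             x ^= v
--             b += 1 if v % 2 else -1
--             length += 1
--             if x == 0 and b == 0:
--                 best = max(best, length)
--         suffix = suffix[1:]
--     return best
-- ===== Notes on version B (the rewrite author's own statement) =====
-- stated objective: alternative
-- what changed: Replaces the one-pass prefix-(xor,parity) hash-map scheme with a direct brute force: for every start position (each suffix) rescan forward, maintaining the window's running xor and odd/even balance and recording the window length whenever both are zero.
import Mathlib
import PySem

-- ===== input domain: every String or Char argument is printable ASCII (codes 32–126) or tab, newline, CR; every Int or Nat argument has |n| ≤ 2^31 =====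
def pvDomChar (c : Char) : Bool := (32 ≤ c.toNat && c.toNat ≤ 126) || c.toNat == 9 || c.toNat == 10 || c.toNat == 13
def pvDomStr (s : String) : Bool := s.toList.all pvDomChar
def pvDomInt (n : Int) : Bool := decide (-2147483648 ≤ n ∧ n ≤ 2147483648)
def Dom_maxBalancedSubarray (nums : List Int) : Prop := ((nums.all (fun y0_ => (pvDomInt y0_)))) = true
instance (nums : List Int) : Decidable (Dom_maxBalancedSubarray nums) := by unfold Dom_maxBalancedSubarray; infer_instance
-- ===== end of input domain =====

-- B replaces A's one-pass prefix-(xor,parity) hash map with a brute-force rescan from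
-- every start position (alternative algorithm; same return value on every input).

-- '1 if v % 2 else -1' (the same subexpression in both Pythons)
def pvSigma (v : Int) : Int := if PySem.Int.mod v 2 = 0 then -1 else 1

-- ===== PORT A =====
def pvAstep (st : Int × Int × PySem.Dict (Int × Int) Int × Int) (p : Int × Int) :
    Int × Int × PySem.Dict (Int × Int) Int × Int :=
  let x := PySem.Int.bxor st.1 p.2            -- x ^= v
  let b := st.2.1 + pvSigma p.2               -- b += 1 if v%2 else -1
  let m := st.2.2.1
  let r := st.2.2.2
  match m.get? (x, b) with                    -- 'if k in m' = the lookup succeeds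
  | some j => (x, b, m, max r (p.1 - j))      -- r = max(r, i - m[k])
  | none   => (x, b, m.insert (x, b) p.1, r)  -- m[k] = i

def maxBalancedSubarray (nums : List Int) : Int :=
  -- m = {(0,0): -1} is the one-entry dict
  ((PySem.List.enumerate nums 0).foldl pvAstep
      (0, 0, (PySem.Dict.empty : PySem.Dict (Int × Int) Int).insert (0, 0) (-1), 0)).2.2.2

-- ===== PORT B =====
-- inner 'for v in suffix' loop of Source B
def pvScan : List Int → Int → Int → Int → Int → Int
  | [], _x, _b, _len, best => best
  | v :: rest, x, b, len, best =>
    let x' := PySem.Int.bxor x v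
    let b' := b + pvSigma v
    let len' := len + 1
    pvScan rest x' b' len' (if x' = 0 ∧ b' = 0 then max best len' else best)

-- 'while suffix' loop of Source B; suffix[1:] of a nonempty list is its tail
def pvOuter : List Int → Int → Int
  | [], best => best
  | v :: rest, best => pvOuter rest (pvScan (v :: rest) 0 0 0 best)

def maxBalancedSubarray_alt (nums : List Int) : Int := pvOuter nums 0

-- ===== PRECONDITION & SPEC =====
def Spec_maxBalancedSubarray (nums : List Int) (out : Int) : Prop := out = maxBalancedSubarray_alt nums
instance (nums : List Int) (out : Int) : Decidable (Spec_maxBalancedSubarray nums out) := by unfold Spec_maxBalancedSubarray; infer_instance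

-- ===== CLAIM (what is proved, stated in full; the proofs are below) =====
def Claim_equal_maxBalancedSubarray : Prop := ∀ (nums : List Int), Dom_maxBalancedSubarray nums → Spec_maxBalancedSubarray nums (maxBalancedSubarray nums)

-- ===== LEMMAS AND PROOFS =====

-- evaluation of Python's integer xor on the two Int constructors
theorem pvBxor_natCast_negSucc (m n : ℕ) :
    PySem.Int.bxor (m : Int) (Int.negSucc n) = Int.negSucc (m ^^^ n) := by
  simp [PySem.Int.bxor, Int.negSucc_eq]
  omega

theorem pvBxor_negSucc_natCast (m n : ℕ) :
    PySem.Int.bxor (Int.negSucc m) (n : Int) = Int.negSucc (m ^^^ n) := by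
  simp [PySem.Int.bxor, Int.negSucc_eq]
  omega

theorem pvBxor_negSucc_negSucc (m n : ℕ) :
    PySem.Int.bxor (Int.negSucc m) (Int.negSucc n) = ((m ^^^ n : ℕ) : Int) := by
  simp [PySem.Int.bxor, Int.negSucc_eq]
  omega

theorem pvBxor_assoc (a b c : Int) :
    PySem.Int.bxor (PySem.Int.bxor a b) c = PySem.Int.bxor a (PySem.Int.bxor b c) := by
  cases a <;> cases b <;> cases c <;>
    simp [pvBxor_natCast_negSucc, pvBxor_negSucc_natCast,
      pvBxor_negSucc_negSucc, Nat.xor_assoc]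

theorem pvZero_bxor (v : Int) : PySem.Int.bxor 0 v = v := by
  rw [PySem.Int.bxor_comm, PySem.Int.bxor_zero]

theorem pvBxor_invol (a v : Int) : PySem.Int.bxor (PySem.Int.bxor a v) v = a := by
  rw [pvBxor_assoc, PySem.Int.bxor_self, PySem.Int.bxor_zero]

theorem pvBxor_eq_self_iff (a c : Int) : PySem.Int.bxor a c = a ↔ c = 0 := by
  constructor
  · intro h
    calc c = PySem.Int.bxor (PySem.Int.bxor c a) a := (pvBxor_invol c a).symm
      _ = PySem.Int.bxor (PySem.Int.bxor a c) a := by rw [PySem.Int.bxor_comm c a]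
      _ = PySem.Int.bxor a a := by rw [h]
      _ = 0 := PySem.Int.bxor_self a
  · intro h; rw [h, PySem.Int.bxor_zero]

-- prefix xor / prefix balance
def pvPx (a : Int) (l : List Int) : Int := l.foldl PySem.Int.bxor a
def pvPb (a : Int) (l : List Int) : Int := l.foldl (fun b v => b + pvSigma v) a
def pvPref (l : List Int) : Int × Int := (pvPx 0 l, pvPb 0 l)

theorem pvPx_cons (a v : Int) (l : List Int) : pvPx a (v :: l) = pvPx (PySem.Int.bxor a v) l := rfl
theorem pvPb_cons (a v : Int) (l : List Int) : pvPb a (v :: l) = pvPb (a + pvSigma v) l := rfl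

theorem pvPx_append (a : Int) (l₁ l₂ : List Int) : pvPx a (l₁ ++ l₂) = pvPx (pvPx a l₁) l₂ := by
  simp [pvPx]
theorem pvPb_append (a : Int) (l₁ l₂ : List Int) : pvPb a (l₁ ++ l₂) = pvPb (pvPb a l₁) l₂ := by
  simp [pvPb]

theorem pvPx_eq (l : List Int) : ∀ a, pvPx a l = PySem.Int.bxor a (pvPx 0 l) := by
  induction l with
  | nil => intro a; simp [pvPx, PySem.Int.bxor_zero]
  | cons v t ih =>
    intro a
    rw [pvPx_cons, pvPx_cons, pvZero_bxor, ih (PySem.Int.bxor a v), ih v, pvBxor_assoc]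

theorem pvPb_eq (l : List Int) : ∀ a, pvPb a l = a + pvPb 0 l := by
  induction l with
  | nil => intro a; simp [pvPb]
  | cons v t ih =>
    intro a
    rw [pvPb_cons, pvPb_cons, ih (a + pvSigma v), ih (0 + pvSigma v)]
    ring

-- prefix-equality ↔ balanced-window bridge
theorem pvBridge (nums : List Int) (s t : ℕ) (hst : s ≤ t) :
    pvPref (nums.take t) = pvPref (nums.take s) ↔
      (pvPx 0 ((nums.drop s).take (t - s)) = 0 ∧ pvPb 0 ((nums.drop s).take (t - s)) = 0) := by
  have hsplit : nums.take t = nums.take s ++ (nums.drop s).take (t - s) := by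
    rw [← List.take_add (l := nums) (i := s) (j := t - s)]
    congr 1
    omega
  set w := (nums.drop s).take (t - s) with hw
  constructor
  · intro h
    have hx : pvPx 0 (nums.take t) = pvPx 0 (nums.take s) := congrArg Prod.fst h
    have hb : pvPb 0 (nums.take t) = pvPb 0 (nums.take s) := congrArg Prod.snd h
    rw [hsplit, pvPx_append, pvPx_eq w] at hx
    rw [hsplit, pvPb_append, pvPb_eq] at hb
    exact ⟨(pvBxor_eq_self_iff _ _).mp hx, by omega⟩
  · intro hwin
    have h1 : pvPx 0 (nums.take t) = pvPx 0 (nums.take s) := by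
      rw [hsplit, pvPx_append, pvPx_eq w, hwin.1, PySem.Int.bxor_zero]
    have h2 : pvPb 0 (nums.take t) = pvPb 0 (nums.take s) := by
      rw [hsplit, pvPb_append, pvPb_eq, hwin.2]; ring
    exact Prod.ext h1 h2

-- ----- B-side loop lemmas -----
theorem pvLe_scan (l : List Int) : ∀ x b c best, best ≤ pvScan l x b c best := by
  induction l with
  | nil => intro _ _ _ _; exact le_rfl
  | cons v rest ih =>
    intro x b c best
    simp only [pvScan]
    refine le_trans ?_ (ih _ _ _ _)
    split_ifs with hc
    · exact le_max_left _ _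
    · exact le_rfl

theorem pvScan_ge (l : List Int) : ∀ x b c best (k : ℕ), 1 ≤ k → k ≤ l.length →
    pvPx x (l.take k) = 0 → pvPb b (l.take k) = 0 → c + (k : Int) ≤ pvScan l x b c best := by
  induction l with
  | nil =>
    intro _ _ _ _ k h1 h2 _ _
    simp only [List.length_nil] at h2
    omega
  | cons v rest ih =>
    intro x b c best k h1 h2 hx hb
    simp only [pvScan]
    obtain ⟨k', rfl⟩ : ∃ k', k = k' + 1 := ⟨k - 1, by omega⟩
    simp only [List.take_succ_cons] at hx hb
    rw [pvPx_cons] at hx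
    rw [pvPb_cons] at hb
    cases Nat.eq_zero_or_pos k' with
    | inl h0 =>
      subst h0
      simp only [List.take_zero] at hx hb
      simp only [pvPx, pvPb, List.foldl_nil] at hx hb
      rw [if_pos ⟨hx, hb⟩]
      refine le_trans ?_ (pvLe_scan _ _ _ _ _)
      calc c + ((0 + 1 : ℕ) : Int) = c + 1 := by norm_num
        _ ≤ max best (c + 1) := le_max_right _ _
    | inr hpos =>
      refine le_trans (le_of_eq ?_)
        (ih _ _ _ _ k' (by omega) (by simp only [List.length_cons] at h2; omega) hx hb)
      push_cast
      ring

theorem pvScan_le (l : List Int) : ∀ x b c best K, best ≤ K →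
    (∀ k : ℕ, 1 ≤ k → k ≤ l.length → pvPx x (l.take k) = 0 → pvPb b (l.take k) = 0 →
      c + (k : Int) ≤ K) →
    pvScan l x b c best ≤ K := by
  induction l with
  | nil => intro _ _ _ _ _ h _; exact h
  | cons v rest ih =>
    intro x b c best K hbK hwin
    simp only [pvScan]
    apply ih
    · split_ifs with hc
      · refine max_le hbK ?_
        have h1 := hwin 1 le_rfl (by simp) ?_ ?_
        · push_cast at h1; omega
        · simp only [List.take_succ_cons, List.take_zero]
          rw [pvPx_cons]; simpa [pvPx] using hc.1
        · simp only [List.take_succ_cons, List.take_zero]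
          rw [pvPb_cons]; simpa [pvPb] using hc.2
      · exact hbK
    · intro k hk1 hk2 hx hb
      have h := hwin (k + 1) (by omega) (by simp only [List.length_cons]; omega) ?_ ?_
      · push_cast at h ⊢; omega
      · simp only [List.take_succ_cons]; rw [pvPx_cons]; exact hx
      · simp only [List.take_succ_cons]; rw [pvPb_cons]; exact hb

theorem pvLe_outer (l : List Int) : ∀ best, best ≤ pvOuter l best := by
  induction l with
  | nil => intro _; exact le_rfl
  | cons v rest ih =>
    intro best
    simp only [pvOuter]
    exact le_trans (pvLe_scan _ _ _ _ _) (ih _)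

theorem pvOuter_ge (l : List Int) : ∀ best (s k : ℕ), 1 ≤ k → s + k ≤ l.length →
    pvPx 0 ((l.drop s).take k) = 0 → pvPb 0 ((l.drop s).take k) = 0 →
    (k : Int) ≤ pvOuter l best := by
  induction l with
  | nil =>
    intro _ _ k _ h _ _
    simp only [List.length_nil] at h
    omega
  | cons v rest ih =>
    intro best s k hk hlen hx hb
    simp only [pvOuter]
    cases s with
    | zero =>
      simp only [List.drop_zero] at hx hb
      refine le_trans ?_ (pvLe_outer rest _)
      have h := pvScan_ge (v :: rest) 0 0 0 best k hk
        (by simp only [List.length_cons]; simp only [List.length_cons] at hlen; omega) hx hb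
      omega
    | succ s' =>
      exact ih _ s' k hk (by simp only [List.length_cons] at hlen; omega)
        (by simpa using hx) (by simpa using hb)

theorem pvOuter_le (l : List Int) : ∀ best K, best ≤ K →
    (∀ s k : ℕ, 1 ≤ k → s + k ≤ l.length → pvPx 0 ((l.drop s).take k) = 0 →
      pvPb 0 ((l.drop s).take k) = 0 → (k : Int) ≤ K) →
    pvOuter l best ≤ K := by
  induction l with
  | nil => intro _ _ h _; exact h
  | cons v rest ih =>
    intro best K hbK hwin
    simp only [pvOuter]
    apply ih
    · refine pvScan_le _ _ _ _ _ _ hbK ?_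
      intro k hk1 hk2 hx hb
      have h := hwin 0 k hk1 (by simp only [List.length_cons] at hk2 ⊢; omega)
        (by simpa using hx) (by simpa using hb)
      omega
    · intro s k hk1 hk2 hx hb
      exact hwin (s + 1) k hk1 (by simp only [List.length_cons]; omega)
        (by simpa using hx) (by simpa using hb)

-- ----- A-side loop invariant -----
def pvInv (u : List Int) (m : PySem.Dict (Int × Int) Int) : Prop :=
  ∀ k j, m.get? k = some j ↔
    ∃ s : ℕ, s ≤ u.length ∧ pvPref (u.take s) = k ∧ j = (s : Int) - 1 ∧
      ∀ s' : ℕ, s' < s → pvPref (u.take s') ≠ k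

def pvLB (u : List Int) (r : Int) : Prop :=
  ∀ s t : ℕ, s < t → t ≤ u.length → pvPref (u.take s) = pvPref (u.take t) →
    (t : Int) - (s : Int) ≤ r

def pvUB (u : List Int) (r : Int) : Prop :=
  ∀ K : Int, 0 ≤ K →
    (∀ s t : ℕ, s < t → t ≤ u.length → pvPref (u.take s) = pvPref (u.take t) →
      (t : Int) - (s : Int) ≤ K) →
    r ≤ K

theorem pvInv_none (u : List Int) (m : PySem.Dict (Int × Int) Int) (hinv : pvInv u m)
    (k : Int × Int) (hnone : m.get? k = none) :
    ∀ s : ℕ, s ≤ u.length → pvPref (u.take s) ≠ k := by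
  intro s hs hpref
  have hex : ∃ s' : ℕ, pvPref (u.take s') = k := ⟨s, hpref⟩
  have hs₀ : pvPref (u.take (Nat.find hex)) = k := Nat.find_spec hex
  have hmin : ∀ s' < Nat.find hex, pvPref (u.take s') ≠ k := fun s' h => Nat.find_min hex h
  have hle : Nat.find hex ≤ u.length := le_trans (Nat.find_min' hex hpref) hs
  have h2 := (hinv k ((Nat.find hex : Int) - 1)).mpr ⟨Nat.find hex, hle, hs₀, rfl, hmin⟩
  rw [hnone] at h2
  simp at h2

theorem pvA_loop (l : List Int) : ∀ (done : List Int) (m : PySem.Dict (Int × Int) Int) (r : Int),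
    pvInv done m → 0 ≤ r → pvLB done r → pvUB done r →
    0 ≤ ((PySem.List.enumerate l (done.length : Int)).foldl pvAstep
          (pvPx 0 done, pvPb 0 done, m, r)).2.2.2 ∧
    pvLB (done ++ l) ((PySem.List.enumerate l (done.length : Int)).foldl pvAstep
          (pvPx 0 done, pvPb 0 done, m, r)).2.2.2 ∧
    pvUB (done ++ l) ((PySem.List.enumerate l (done.length : Int)).foldl pvAstep
          (pvPx 0 done, pvPb 0 done, m, r)).2.2.2 := by
  induction l with
  | nil =>
    intro done m r hinv hr hLB hUB
    simp only [PySem.List.enumerate_nil, List.foldl_nil, List.append_nil]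
    exact ⟨hr, hLB, hUB⟩
  | cons v rest ih =>
    intro done m r hinv hr hLB hUB
    rw [PySem.List.enumerate_cons, List.foldl_cons, List.append_cons]
    have hpx : pvPx 0 (done ++ [v]) = PySem.Int.bxor (pvPx 0 done) v := by
      rw [pvPx_append]; rfl
    have hpb : pvPb 0 (done ++ [v]) = pvPb 0 done + pvSigma v := by
      rw [pvPb_append]; rfl
    have hcast : (done.length : Int) + 1 = (((done ++ [v]).length : ℕ) : Int) := by
      simp
    have htke : ∀ s : ℕ, s ≤ done.length → (done ++ [v]).take s = done.take s :=
      fun s hs => List.take_append_of_le_length hs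
    have htkeq : (done ++ [v]).take (done.length + 1) = done ++ [v] :=
      List.take_of_length_le (by simp)
    have hlen2 : (done ++ [v]).length = done.length + 1 := by simp
    rcases hget : m.get? (pvPref (done ++ [v])) with _ | j
    · -- key not in m: insert
      have hstep : pvAstep (pvPx 0 done, pvPb 0 done, m, r) ((done.length : Int), v)
          = (pvPx 0 (done ++ [v]), pvPb 0 (done ++ [v]),
             m.insert (pvPref (done ++ [v])) (done.length : Int), r) := by
        simp only [pvAstep]
        rw [← hpx, ← hpb,
          show ((pvPx 0 (done ++ [v]), pvPb 0 (done ++ [v])) : Int × Int)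
            = pvPref (done ++ [v]) from rfl, hget]
      rw [hstep, hcast]
      have hnone : ∀ s ≤ done.length, pvPref (done.take s) ≠ pvPref (done ++ [v]) :=
        pvInv_none done m hinv _ hget
      have hinv' : pvInv (done ++ [v]) (m.insert (pvPref (done ++ [v])) (done.length : Int)) := by
        intro k' j'
        rw [PySem.Dict.get?_insert]
        by_cases hk : k' = pvPref (done ++ [v])
        · rw [if_pos hk]
          subst hk
          constructor
          · intro h
            have hj' : j' = (done.length : Int) := by
              injection h with h'; omega
            refine ⟨done.length + 1, by rw [hlen2], by rw [htkeq], by push_cast; omega, ?_⟩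
            intro s' hs'
            rw [htke s' (by omega)]
            exact hnone s' (by omega)
          · rintro ⟨s, hs, hpref, hj, hmin⟩
            rw [hlen2] at hs
            have hsd : s = done.length + 1 := by
              by_contra hne
              have hs' : s ≤ done.length := by omega
              rw [htke s hs'] at hpref
              exact hnone s hs' hpref
            subst hsd
            congr 1
            omega
        · rw [if_neg hk, hinv k' j']
          constructor
          · rintro ⟨s, hs, hpref, hj, hmin⟩
            refine ⟨s, by rw [hlen2]; omega, by rw [htke s hs]; exact hpref, hj, ?_⟩
            intro s' h
            rw [htke s' (by omega)]
            exact hmin s' h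
          · rintro ⟨s, hs, hpref, hj, hmin⟩
            rw [hlen2] at hs
            have hsd : s ≤ done.length := by
              by_contra hne
              have : s = done.length + 1 := by omega
              subst this
              rw [htkeq] at hpref
              exact (hk hpref.symm).elim
            refine ⟨s, hsd, by rw [htke s hsd] at hpref; exact hpref, hj, ?_⟩
            intro s' h
            have := hmin s' h
            rw [htke s' (by omega)] at this
            exact this
      have hLB' : pvLB (done ++ [v]) r := by
        intro s t hst ht hpref
        rw [hlen2] at ht
        by_cases htd : t ≤ done.length
        · rw [htke s (by omega), htke t htd] at hpref
          exact hLB s t hst htd hpref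
        · have : t = done.length + 1 := by omega
          subst this
          rw [htke s (by omega), htkeq] at hpref
          exact absurd hpref (hnone s (by omega))
      have hUB' : pvUB (done ++ [v]) r := by
        intro K hK hpairs
        apply hUB K hK
        intro s t hst ht hpref
        refine hpairs s t hst (by rw [hlen2]; omega) ?_
        rw [htke s (by omega), htke t (by omega)]
        exact hpref
      exact ih (done ++ [v]) _ r hinv' hr hLB' hUB'
    · -- key in m: r = max r (i - m[k])
      have hstep : pvAstep (pvPx 0 done, pvPb 0 done, m, r) ((done.length : Int), v)
          = (pvPx 0 (done ++ [v]), pvPb 0 (done ++ [v]), m,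
             max r ((done.length : Int) - j)) := by
        simp only [pvAstep]
        rw [← hpx, ← hpb,
          show ((pvPx 0 (done ++ [v]), pvPb 0 (done ++ [v])) : Int × Int)
            = pvPref (done ++ [v]) from rfl, hget]
      rw [hstep, hcast]
      obtain ⟨s₀, hs₀, hpref₀, hj₀, hmin₀⟩ := (hinv _ j).mp hget
      have hinv' : pvInv (done ++ [v]) m := by
        intro k' j'
        rw [hinv k' j']
        constructor
        · rintro ⟨s, hs, hpref, hj, hmin⟩
          refine ⟨s, by rw [hlen2]; omega, by rw [htke s hs]; exact hpref, hj, ?_⟩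
          intro s' h
          rw [htke s' (by omega)]
          exact hmin s' h
        · rintro ⟨s, hs, hpref, hj, hmin⟩
          rw [hlen2] at hs
          have hsd : s ≤ done.length := by
            by_contra hne
            have hseq : s = done.length + 1 := by omega
            subst hseq
            rw [htkeq] at hpref
            have := hmin s₀ (by omega)
            rw [htke s₀ hs₀] at this
            exact this (hpref₀.trans hpref)
          refine ⟨s, hsd, by rw [htke s hsd] at hpref; exact hpref, hj, ?_⟩
          intro s' h
          have := hmin s' h
          rw [htke s' (by omega)] at this
          exact this
      have hr' : 0 ≤ max r ((done.length : Int) - j) := le_trans hr (le_max_left _ _)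
      have hLB' : pvLB (done ++ [v]) (max r ((done.length : Int) - j)) := by
        intro s t hst ht hpref
        rw [hlen2] at ht
        by_cases htd : t ≤ done.length
        · rw [htke s (by omega), htke t htd] at hpref
          exact le_trans (hLB s t hst htd hpref) (le_max_left _ _)
        · have : t = done.length + 1 := by omega
          subst this
          rw [htke s (by omega), htkeq] at hpref
          have hs₀s : s₀ ≤ s := by
            by_contra h
            exact hmin₀ s (by omega) hpref
          refine le_trans ?_ (le_max_right _ _)
          rw [hj₀] at *
          push_cast
          omega
      have hUB' : pvUB (done ++ [v]) (max r ((done.length : Int) - j)) := by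
        intro K hK hpairs
        refine max_le ?_ ?_
        · apply hUB K hK
          intro s t hst ht hpref
          refine hpairs s t hst (by rw [hlen2]; omega) ?_
          rw [htke s (by omega), htke t (by omega)]
          exact hpref
        · have h := hpairs s₀ (done.length + 1) (by omega) (by rw [hlen2]) ?_
          · rw [hj₀]
            push_cast at h ⊢
            omega
          · rw [htke s₀ hs₀, htkeq, hpref₀]
      exact ih (done ++ [v]) m _ hinv' hr' hLB' hUB'

theorem pvA_bounds (nums : List Int) :
    0 ≤ maxBalancedSubarray nums ∧ pvLB nums (maxBalancedSubarray nums) ∧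
      pvUB nums (maxBalancedSubarray nums) := by
  have hinv0 : pvInv []
      ((PySem.Dict.empty : PySem.Dict (Int × Int) Int).insert (0, 0) (-1)) := by
    intro k j
    rw [PySem.Dict.get?_insert, PySem.Dict.get?_empty]
    by_cases hk : k = ((0 : Int), (0 : Int))
    · rw [if_pos hk]
      subst hk
      constructor
      · intro h
        have hj : j = -1 := by injection h with h'; omega
        exact ⟨0, le_rfl, rfl, by omega, by omega⟩
      · rintro ⟨s, hs, hpref, hj, -⟩
        have hs0 : s = 0 := by simpa using hs
        subst hs0
        congr 1
        omega
    · rw [if_neg hk]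
      constructor
      · intro h
        simp at h
      · rintro ⟨s, hs, hpref, -, -⟩
        have hs0 : s = 0 := by simpa using hs
        subst hs0
        exact (hk hpref.symm).elim
  have hLB0 : pvLB [] 0 := by
    intro s t hst ht _
    simp only [List.length_nil] at ht
    omega
  have hUB0 : pvUB [] 0 := fun K hK _ => hK
  have h := pvA_loop nums [] _ 0 hinv0 le_rfl hLB0 hUB0
  simp only [List.length_nil, Nat.cast_zero, List.nil_append] at h
  simpa only [maxBalancedSubarray, pvPx, pvPb, List.foldl_nil] using h

theorem pvB_bounds (nums : List Int) :
    0 ≤ maxBalancedSubarray_alt nums ∧ pvLB nums (maxBalancedSubarray_alt nums) ∧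
      pvUB nums (maxBalancedSubarray_alt nums) := by
  refine ⟨pvLe_outer nums 0, ?_, ?_⟩
  · intro s t hst ht hpref
    have hb := (pvBridge nums s t (le_of_lt hst)).mp hpref.symm
    have h := pvOuter_ge nums 0 s (t - s) (by omega) (by omega) hb.1 hb.2
    have hcast : ((t - s : ℕ) : Int) = (t : Int) - (s : Int) := by omega
    rw [hcast] at h
    exact h
  · intro K hK hpairs
    refine pvOuter_le nums 0 K hK ?_
    intro s k hk1 hk2 hx hb
    have hw : s + k - s = k := by omega
    have hpref := (pvBridge nums s (s + k) (by omega)).mpr (by rw [hw]; exact ⟨hx, hb⟩)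
    have h := hpairs s (s + k) (by omega) hk2 hpref.symm
    push_cast at h ⊢
    omega

-- ===== VERDICT (by name: the statement is the Claim_ definition above) =====
theorem maxBalancedSubarray_spec : Claim_equal_maxBalancedSubarray := by
  intro nums _
  unfold Spec_maxBalancedSubarray
  obtain ⟨ha0, haLB, haUB⟩ := pvA_bounds nums
  obtain ⟨hb0, hbLB, hbUB⟩ := pvB_bounds nums
  exact le_antisymm (haUB _ hb0 hbLB) (hbUB _ ha0 haLB)
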